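-- pv_equiv track=rewrite | github.com/Moaesaycto/MyGit | utils.py | get_merge_conflicts
-- ===== SOURCE A (Python) =====
-- def get_merge_conflicts(
--     base: dict[str, str],
--     ours: dict[str, str],
--     theirs: dict[str, str]
-- ) -> list[str]:
--     """
--     Returns filenames that have conflicting changes between ours and theirs
--     relative to the base.
--
--     A true conflict occurs when:
--     - base != ours
--     - base != theirs
--     - ours != theirs
--
--     Args:
--         base (dict[str, str]): base commit file -> sha1
--         ours (dict[str, str]): current commit file -> sha1
--         theirs (dict[str, str]): target commit file -> sha1
--
--     Returns:
--         list[str]: list of filenames with 3-way conflicts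
--     """
--     all_files = set(base) | set(ours) | set(theirs)
--     conflicts = []
--
--     for fname in sorted(all_files):
--         base_sha = base.get(fname)
--         our_sha = ours.get(fname)
--         their_sha = theirs.get(fname)
--
--         if (base_sha != our_sha and
--             base_sha != their_sha and
--                 our_sha != their_sha):
--             conflicts.append(fname)
--
--     return conflicts
-- ===== SOURCE B (Python) =====
-- def get_merge_conflicts(
--     base: dict[str, str],
--     ours: dict[str, str],
--     theirs: dict[str, str]
-- ) -> list[str]:
--     all_files = set(base) | set(ours) | set(theirs)
--     base_vs_ours = {f for f in all_files if base.get(f) != ours.get(f)}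
--     base_vs_theirs = {f for f in all_files if base.get(f) != theirs.get(f)}
--     ours_vs_theirs = {f for f in all_files if ours.get(f) != theirs.get(f)}
--     return sorted(base_vs_ours & base_vs_theirs & ours_vs_theirs)
-- ===== Notes on version B (the rewrite author's own statement) =====
-- stated objective: alternative
-- what changed: Instead of sorting the union first and testing the three-way conflict predicate file by file in one loop, B builds three sets (files where base/ours, base/theirs, ours/theirs disagree), intersects them, and sorts the intersection last.
import Mathlib
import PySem

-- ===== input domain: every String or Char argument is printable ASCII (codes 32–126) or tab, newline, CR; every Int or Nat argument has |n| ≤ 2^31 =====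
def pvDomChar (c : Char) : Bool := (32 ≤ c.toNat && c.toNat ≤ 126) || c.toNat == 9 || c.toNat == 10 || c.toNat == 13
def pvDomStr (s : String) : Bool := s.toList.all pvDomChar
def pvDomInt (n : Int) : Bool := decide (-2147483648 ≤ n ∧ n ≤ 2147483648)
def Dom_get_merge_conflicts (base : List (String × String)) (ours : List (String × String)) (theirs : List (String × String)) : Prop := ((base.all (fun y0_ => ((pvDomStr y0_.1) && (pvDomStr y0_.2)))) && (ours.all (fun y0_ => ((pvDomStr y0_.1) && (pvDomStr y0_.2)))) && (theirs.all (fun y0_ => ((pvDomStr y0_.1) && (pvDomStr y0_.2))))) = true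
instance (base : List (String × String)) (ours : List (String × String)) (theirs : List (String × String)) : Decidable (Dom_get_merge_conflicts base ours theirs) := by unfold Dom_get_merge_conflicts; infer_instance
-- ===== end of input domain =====

-- B replaces A's single sorted loop over the union by three difference sets intersected and sorted last; alternative decomposition, same cost.

-- dict.get under the association-list convention: first match, none when absent (shared dict primitive)
def pvDictGet (d : List (String × String)) (k : String) : Option String := List.lookup k d

-- ===== PORT A =====
def get_merge_conflicts (base : List (String × String)) (ours : List (String × String)) (theirs : List (String × String)) : List String :=
  let all_files : PySem.Set String :=
    PySem.Set.union (PySem.Set.union (PySem.Set.ofList (base.map Prod.fst)) (ours.map Prod.fst)) (theirs.map Prod.fst)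
  (PySem.List.sorted all_files (fun x => x) false).foldl
    (fun conflicts fname =>
      let base_sha := pvDictGet base fname
      let our_sha := pvDictGet ours fname
      let their_sha := pvDictGet theirs fname
      if (base_sha != our_sha) && ((base_sha != their_sha) && (our_sha != their_sha))
      then conflicts ++ [fname] else conflicts) []

-- ===== PORT B =====
def get_merge_conflicts_alt (base : List (String × String)) (ours : List (String × String)) (theirs : List (String × String)) : List String :=
  let all_files : PySem.Set String :=
    PySem.Set.union (PySem.Set.union (PySem.Set.ofList (base.map Prod.fst)) (ours.map Prod.fst)) (theirs.map Prod.fst)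
  let base_vs_ours : PySem.Set String := all_files.filter (fun f => pvDictGet base f != pvDictGet ours f)
  let base_vs_theirs : PySem.Set String := all_files.filter (fun f => pvDictGet base f != pvDictGet theirs f)
  let ours_vs_theirs : PySem.Set String := all_files.filter (fun f => pvDictGet ours f != pvDictGet theirs f)
  PySem.List.sorted (PySem.Set.inter (PySem.Set.inter base_vs_ours base_vs_theirs) ours_vs_theirs) (fun x => x) false

-- ===== PRECONDITION & SPEC =====
def Spec_get_merge_conflicts (base : List (String × String)) (ours : List (String × String)) (theirs : List (String × String)) (out : List String) : Prop := out = get_merge_conflicts_alt base ours theirs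
instance (base : List (String × String)) (ours : List (String × String)) (theirs : List (String × String)) (out : List String) : Decidable (Spec_get_merge_conflicts base ours theirs out) := by unfold Spec_get_merge_conflicts; infer_instance

-- ===== CLAIM (what is proved, stated in full; the proofs are below) =====
def Claim_equal_get_merge_conflicts : Prop := ∀ (base : List (String × String)) (ours : List (String × String)) (theirs : List (String × String)), Dom_get_merge_conflicts base ours theirs → Spec_get_merge_conflicts base ours theirs (get_merge_conflicts base ours theirs)

-- ===== LEMMAS AND PROOFS =====

-- Set.add preserves Nodup
theorem pv_nodup_add {s : PySem.Set String} (h : s.Nodup) (x : String) : (PySem.Set.add s x).Nodup := by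
  unfold PySem.Set.add
  split
  · exact h
  · next hc =>
    refine h.append (List.nodup_singleton x) ?_
    intro a ha hax
    simp only [List.mem_singleton] at hax
    exact hc (by simpa [List.contains_iff_mem, hax] using ha)

-- Set.update (hence Set.union) preserves Nodup
theorem pv_nodup_update {s : PySem.Set String} (h : s.Nodup) (xs : List String) : (PySem.Set.update s xs).Nodup := by
  induction xs generalizing s with
  | nil => simpa [PySem.Set.update] using h
  | cons y ys ih => simpa [PySem.Set.update] using ih (pv_nodup_add h y)

-- intersecting with a filter of a superset list is filtering by its predicate
theorem pv_inter_filter (s all : List String) (q : String → Bool) (hsub : ∀ x ∈ s, x ∈ all) :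
    PySem.Set.inter s (all.filter q) = s.filter q := by
  unfold PySem.Set.inter
  apply List.filter_congr
  intro x hx
  have hxall : x ∈ all := hsub x hx
  simp [List.mem_filter, hxall]

-- the core equality: A's filtered sorted union = B's sorted intersection, for any duplicate-free union
theorem pv_main (p1 p2 p3 : String → Bool) (all : List String) (h : all.Nodup) :
    List.foldl (fun c f => if p1 f && (p2 f && p3 f) then c ++ [f] else c) []
      (PySem.List.sorted all (fun x => x) false)
      = PySem.List.sorted
          (PySem.Set.inter (PySem.Set.inter (all.filter p1) (all.filter p2)) (all.filter p3))
          (fun x => x) false := by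
  have hA : List.foldl (fun c f => if p1 f && (p2 f && p3 f) then c ++ [f] else c) []
      (PySem.List.sorted all (fun x => x) false)
      = (PySem.List.sorted all (fun x => x) false).filter (fun f => p1 f && (p2 f && p3 f)) := by
    simpa using PySem.List.foldl_append_if (fun f => p1 f && (p2 f && p3 f)) (fun x => x)
      (PySem.List.sorted all (fun x => x) false) []
  have hB : PySem.Set.inter (PySem.Set.inter (all.filter p1) (all.filter p2)) (all.filter p3)
      = all.filter (fun f => p1 f && (p2 f && p3 f)) := by
    rw [pv_inter_filter (all.filter p1) all p2 (fun x hx => List.mem_of_mem_filter hx)]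
    rw [pv_inter_filter ((all.filter p1).filter p2) all p3
      (fun x hx => List.mem_of_mem_filter (List.mem_of_mem_filter hx))]
    rw [List.filter_filter, List.filter_filter]
    apply List.filter_congr
    intro x hx
    cases p1 x <;> cases p2 x <;> cases p3 x <;> simp
  have hperm : ((PySem.List.sorted all (fun x => x) false).filter (fun f => p1 f && (p2 f && p3 f))).Perm
      (all.filter (fun f => p1 f && (p2 f && p3 f))) :=
    (PySem.List.sorted_perm all (fun x => x) false).filter _
  have hpw : ((PySem.List.sorted all (fun x => x) false).filter (fun f => p1 f && (p2 f && p3 f))).Pairwise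
      (fun a b => a < b) := by
    apply List.Pairwise.filter
    have h1 : (PySem.List.sorted all (fun x => x) false).Pairwise (fun a b => a ≤ b) := by
      simpa using PySem.List.sorted_pairwise all (fun x => x)
    have h2 : (PySem.List.sorted all (fun x => x) false).Nodup :=
      ((PySem.List.sorted_perm all (fun x => x) false).nodup_iff).mpr h
    exact (h1.and h2).imp (fun hab => lt_of_le_of_ne hab.1 hab.2)
  rw [hB]
  exact hA.trans (Eq.symm (PySem.List.sorted_eq_of_perm_of_pairwise_lt _ _ (fun x => x) hperm hpw))

-- ===== VERDICT (by name: the statement is the Claim_ definition above) =====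
theorem get_merge_conflicts_spec : Claim_equal_get_merge_conflicts := by
  intro base ours theirs _
  show get_merge_conflicts base ours theirs = get_merge_conflicts_alt base ours theirs
  exact pv_main
    (fun f => pvDictGet base f != pvDictGet ours f)
    (fun f => pvDictGet base f != pvDictGet theirs f)
    (fun f => pvDictGet ours f != pvDictGet theirs f)
    (PySem.Set.union (PySem.Set.union (PySem.Set.ofList (base.map Prod.fst)) (ours.map Prod.fst)) (theirs.map Prod.fst))
    (pv_nodup_update (pv_nodup_update (PySem.Set.nodup_ofList _) _) _)
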